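-- pv_equiv track=rewrite | github.com/voonkvuno/Algorithm | 프로그래머스/lv1/131128. 숫자 짝꿍/숫자 짝꿍.py | solution
-- ===== SOURCE A (Python) =====
-- def solution(X, Y):
--     x, y, answer = {}, {}, []
--
--     for i in X:
--         x[i] = x.get(i, 0) + 1
--     for i in Y:
--         y[i] = y.get(i, 0) + 1
--
--     for i in x if len(X) < len(Y) else y:
--         if x.get(i,0) >= y.get(i,0):
--             answer += i*y.get(i,0)
--         else:
--             answer += i*x.get(i,0)
--
--     if len(answer) == 0:
--         return '-1'
--     if answer.count('0') == len(answer):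
--         return '0'
--     return ''.join(sorted(answer, reverse=True))
-- ===== SOURCE B (Python) =====
-- def solution(X, Y):
--     # Counting sort over character codes: count X and Y into fixed arrays,
--     # then emit each character min(countX, countY) times from the highest
--     # code down -- the result is already sorted descending, no sort needed.
--     cx = [0] * 128
--     cy = [0] * 128
--     for ch in X:
--         cx[ord(ch)] += 1
--     for ch in Y:
--         cy[ord(ch)] += 1
--     parts = []
--     for code in range(126, -1, -1):
--         a, b = cx[code], cy[code]
--         m = a if a < b else b
--         parts.append(chr(code) * m)
--     s = ''.join(parts)
--     if not s:
--         return '-1'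
--     m0 = cx[48] if cx[48] < cy[48] else cy[48]
--     if m0 == len(s):
--         return '0'
--     return s
-- ===== Notes on version B (the rewrite author's own statement) =====
-- stated objective: faster
-- what changed: Replaces the two hash-map counters plus comparison sort of the matched characters with fixed 128-slot counting arrays and a single descending sweep over character codes that emits the output already sorted, so no sort is performed.
import Mathlib
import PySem

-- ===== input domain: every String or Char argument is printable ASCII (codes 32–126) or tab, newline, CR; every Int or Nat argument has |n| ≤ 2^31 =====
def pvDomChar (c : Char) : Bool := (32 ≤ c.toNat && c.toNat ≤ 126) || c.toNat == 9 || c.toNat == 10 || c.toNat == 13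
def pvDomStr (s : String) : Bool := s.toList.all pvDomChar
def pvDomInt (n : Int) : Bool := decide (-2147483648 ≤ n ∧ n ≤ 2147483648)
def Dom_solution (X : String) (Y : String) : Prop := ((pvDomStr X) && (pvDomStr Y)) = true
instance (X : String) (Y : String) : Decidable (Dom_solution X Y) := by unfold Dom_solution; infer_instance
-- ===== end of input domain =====

-- B replaces A's dict counters + comparison sort by 128-slot counting arrays and a
-- descending sweep over character codes that emits the output already sorted (no sort).

-- ===== PORT A =====
-- dict counters, a pass over the keys of one counter appending min-count repetitions,
-- then ''.join(sorted(answer, reverse=True)).  'c' * n is List.replicate n.toNat c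
-- (exact: the repeated counts are nonnegative); 1-char strings compare by code point.
def solution (X : String) (Y : String) : String :=
  let x : PySem.Dict Char Int := X.toList.foldl (fun d i => d.insert i (d.getD i 0 + 1)) PySem.Dict.empty
  let y : PySem.Dict Char Int := Y.toList.foldl (fun d i => d.insert i (d.getD i 0 + 1)) PySem.Dict.empty
  let answer : List Char :=
    (if PySem.Str.len X < PySem.Str.len Y then x.keys else y.keys).foldl
      (fun acc i =>
        if x.getD i 0 ≥ y.getD i 0 then acc ++ List.replicate (y.getD i 0).toNat i
        else acc ++ List.replicate (x.getD i 0).toNat i) []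
  if answer.length = 0 then "-1"
  else if PySem.List.count answer '0' = answer.length then "0"
  else String.ofList (PySem.List.sorted answer (fun c => c.toNat) true)

-- ===== PORT B =====
-- 128-slot counting arrays ('cx[ord(ch)] += 1' ported with List.set / List.getD —
-- exact wherever the Python index is in range, i.e. on every character of Dom),
-- then one sweep over codes 126..0 emitting min-count repetitions (already sorted).
def solution_alt (X : String) (Y : String) : String :=
  let cx : List Int := X.toList.foldl (fun a ch => a.set ch.toNat (a.getD ch.toNat 0 + 1)) (List.replicate 128 0)
  let cy : List Int := Y.toList.foldl (fun a ch => a.set ch.toNat (a.getD ch.toNat 0 + 1)) (List.replicate 128 0)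
  let parts : List (List Char) :=
    (PySem.List.pyRange 126 (-1) (-1)).map (fun code =>
      let a := PySem.List.pyGetD cx code 0
      let b := PySem.List.pyGetD cy code 0
      let m := if a < b then a else b
      List.replicate m.toNat (Char.ofNat code.toNat))
  let s := PySem.Chars.join [] parts
  if s.length = 0 then "-1"
  else if (if PySem.List.pyGetD cx 48 0 < PySem.List.pyGetD cy 48 0 then PySem.List.pyGetD cx 48 0
           else PySem.List.pyGetD cy 48 0) = (s.length : Int) then "0"
  else String.ofList s

-- ===== PRECONDITION & SPEC =====
def Spec_solution (X : String) (Y : String) (out : String) : Prop := out = solution_alt X Y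
instance (X : String) (Y : String) (out : String) : Decidable (Spec_solution X Y out) := by unfold Spec_solution; infer_instance

-- ===== CLAIM (what is proved, stated in full; the proofs are below) =====
def Claim_equal_solution : Prop := ∀ (X : String) (Y : String), Dom_solution X Y → Spec_solution X Y (solution X Y)

-- ===== LEMMAS AND PROOFS =====

-- the common multiplicity: each character occurs min(count in X, count in Y) times
def pvMult (X Y : String) (c : Char) : Nat := min (X.toList.count c) (Y.toList.count c)

-- the canonical output list: codes 126..0, each repeated pvMult times
def pvCanon (X Y : String) : List Char :=
  ((List.range 127).reverse).flatMap (fun k => List.replicate (pvMult X Y (Char.ofNat k)) (Char.ofNat k))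

theorem pv_dom_lt (X : String) (h : pvDomStr X = true) : ∀ ch ∈ X.toList, ch.toNat < 127 := by
  intro ch hch
  have := (List.all_eq_true.mp h) ch hch
  simp [pvDomChar] at this
  omega

-- counting-array invariant
theorem pv_getD_set (l : List Int) (i k : Nat) (v : Int) :
    (l.set i v).getD k 0 = if i = k ∧ i < l.length then v else l.getD k 0 := by
  simp only [List.getD, List.getElem?_set]
  split_ifs <;> simp_all
  omega

theorem pv_cnt_arr (l : List Char) (init : List Int) (k : Nat) (hk : k < init.length) :
    (l.foldl (fun a ch => a.set ch.toNat (a.getD ch.toNat 0 + 1)) init).getD k 0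
      = init.getD k 0 + (l.countP (fun ch => ch.toNat == k) : Int) := by
  induction l generalizing init with
  | nil => simp
  | cons c t ih =>
    rw [List.foldl_cons, ih _ (by simpa using hk), pv_getD_set]
    by_cases hc : c.toNat = k
    · simp [hc, hk]
      ring
    · simp [hc]

theorem pv_countP_eq_count (l : List Char) (k : Nat) (hk : k < 55296) :
    l.countP (fun ch => ch.toNat == k) = l.count (Char.ofNat k) := by
  rw [List.count_eq_countP]
  have hv : (Char.ofNat k).toNat = k := by
    rw [Char.toNat_ofNat]; simp [Nat.isValidChar, hk]
  apply List.countP_congr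
  intro ch _
  by_cases h : ch = Char.ofNat k
  · simp [h, hv]
  · have h' : ch.toNat ≠ k := fun hh => h (by rw [← hh, Char.ofNat_toNat])
    simp [h, h']

-- count of c in a flatMap of self-replicates over a Nodup list
theorem pv_count_flatMap_self (L : List Char) (m : Char → Nat) (c : Char) (hnd : L.Nodup) :
    (L.flatMap (fun i => List.replicate (m i) i)).count c = if c ∈ L then m c else 0 := by
  induction L with
  | nil => simp
  | cons i t ih =>
    have hnd' := hnd
    rw [List.nodup_cons] at hnd'
    rw [List.flatMap_cons, List.count_append, List.count_replicate, ih hnd'.2]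
    by_cases hic : i = c
    · subst hic
      simp [hnd'.1]
    · simp [hic, Ne.symm hic, beq_iff_eq]

-- count of c in a flatMap of Char.ofNat-replicates over a Nodup list of small codes
theorem pv_count_flatMap_ofNat (L : List Nat) (m : Char → Nat) (c : Char)
    (hnd : L.Nodup) (hsm : ∀ k ∈ L, k < 55296) :
    (L.flatMap (fun k => List.replicate (m (Char.ofNat k)) (Char.ofNat k))).count c
      = if c.toNat ∈ L then m c else 0 := by
  induction L with
  | nil => simp
  | cons k t ih =>
    have hnd' := hnd
    rw [List.nodup_cons] at hnd'
    have hk : k < 55296 := hsm k (by simp)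
    have hv : (Char.ofNat k).toNat = k := by
      rw [Char.toNat_ofNat]; simp [Nat.isValidChar, hk]
    rw [List.flatMap_cons, List.count_append, List.count_replicate,
      ih hnd'.2 (fun j hj => hsm j (by simp [hj]))]
    by_cases hkc : Char.ofNat k = c
    · subst hkc
      simp [hv, hnd'.1]
    · have hck : c.toNat ≠ k := by
        intro h
        exact hkc (by rw [← h, Char.ofNat_toNat])
      simp [hkc, hck]

-- A's answer list, with the counter-foldls already named Dict.counter (defeq)
def pvAnswer (X Y : String) : List Char :=
  (if PySem.Str.len X < PySem.Str.len Y then (PySem.Dict.counter X.toList).keys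
   else (PySem.Dict.counter Y.toList).keys).foldl
    (fun acc i =>
      if (PySem.Dict.counter X.toList).getD i 0 ≥ (PySem.Dict.counter Y.toList).getD i 0
      then acc ++ List.replicate ((PySem.Dict.counter Y.toList).getD i 0).toNat i
      else acc ++ List.replicate ((PySem.Dict.counter X.toList).getD i 0).toNat i) []

theorem pv_solution_eq (X Y : String) :
    solution X Y =
      (if (pvAnswer X Y).length = 0 then "-1"
       else if PySem.List.count (pvAnswer X Y) '0' = (pvAnswer X Y).length then "0"
       else String.ofList (PySem.List.sorted (pvAnswer X Y) (fun c => c.toNat) true)) := rfl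

theorem pv_join_nil (parts : List (List Char)) : PySem.Chars.join [] parts = parts.flatten := by
  simp only [PySem.Chars.join]
  induction parts with
  | nil => rfl
  | cons p ps ih => simp [List.intercalate] at *; cases ps <;> simp_all

theorem pv_answer_flatMap (X Y : String) :
    pvAnswer X Y =
      (if PySem.Str.len X < PySem.Str.len Y then PySem.Set.ofList X.toList
       else PySem.Set.ofList Y.toList).flatMap (fun i => List.replicate (pvMult X Y i) i) := by
  unfold pvAnswer
  simp only [PySem.Dict.keys_counter, PySem.Dict.getD_counter]
  have hfun : (fun (acc : List Char) i =>
      if ((X.toList.count i : Int)) ≥ ((Y.toList.count i : Int))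
      then acc ++ List.replicate ((Y.toList.count i : Int)).toNat i
      else acc ++ List.replicate ((X.toList.count i : Int)).toNat i)
      = (fun (acc : List Char) i => acc ++ List.replicate (pvMult X Y i) i) := by
    funext acc i
    unfold pvMult
    split_ifs with hge
    · have : min (X.toList.count i) (Y.toList.count i) = Y.toList.count i := by
        rw [ge_iff_le, Nat.cast_le] at hge; omega
      rw [this, Int.toNat_natCast]
    · have : min (X.toList.count i) (Y.toList.count i) = X.toList.count i := by
        rw [ge_iff_le, Nat.cast_le] at hge; omega
      rw [this, Int.toNat_natCast]
  rw [hfun, PySem.List.foldl_append_eq_flatMap]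
  simp

theorem pv_count_answer (X Y : String) (c : Char) :
    (pvAnswer X Y).count c = pvMult X Y c := by
  rw [pv_answer_flatMap]
  split_ifs with h
  · rw [pv_count_flatMap_self _ _ _ (PySem.Set.nodup_ofList _)]
    by_cases hc : c ∈ PySem.Set.ofList X.toList
    · simp [hc]
    · have hm : c ∉ X.toList := fun hh => hc ((PySem.Set.mem_ofList _ _).mpr hh)
      have h0 : X.toList.count c = 0 := List.count_eq_zero.mpr hm
      simp [hc, pvMult, h0]
  · rw [pv_count_flatMap_self _ _ _ (PySem.Set.nodup_ofList _)]
    by_cases hc : c ∈ PySem.Set.ofList Y.toList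
    · simp [hc]
    · have hm : c ∉ Y.toList := fun hh => hc ((PySem.Set.mem_ofList _ _).mpr hh)
      have h0 : Y.toList.count c = 0 := List.count_eq_zero.mpr hm
      simp [hc, pvMult, h0]

theorem pv_count_canon (X Y : String) (hX : pvDomStr X = true) (c : Char) :
    (pvCanon X Y).count c = pvMult X Y c := by
  unfold pvCanon
  rw [pv_count_flatMap_ofNat _ _ _ (List.nodup_reverse.mpr List.nodup_range)
    (fun k hk => by simp at hk; omega)]
  by_cases hc : c.toNat ∈ (List.range 127).reverse
  · simp [hc]
  · simp only [hc, if_false]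
    have hge : 127 ≤ c.toNat := by
      simp [List.mem_reverse, List.mem_range] at hc; omega
    have hm : c ∉ X.toList := fun hh => by have := pv_dom_lt X hX c hh; omega
    have h0 : X.toList.count c = 0 := List.count_eq_zero.mpr hm
    simp [pvMult, h0]

theorem pv_perm (X Y : String) (hX : pvDomStr X = true) :
    (pvAnswer X Y).Perm (pvCanon X Y) :=
  List.perm_iff_count.mpr fun c => by rw [pv_count_answer, pv_count_canon X Y hX]

theorem pv_canon_pairwise (X Y : String) :
    (pvCanon X Y).Pairwise (fun a b => b.toNat ≤ a.toNat) := by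
  unfold pvCanon
  rw [List.flatMap_def, List.pairwise_flatten]
  constructor
  · intro l hl
    simp only [List.mem_map] at hl
    obtain ⟨k, _, rfl⟩ := hl
    exact List.pairwise_replicate.mpr (Or.inr le_rfl)
  · rw [List.pairwise_map, List.pairwise_reverse]
    have : (List.range 127).Pairwise (fun k1 k2 => k1 < k2) := List.pairwise_lt_range
    refine this.imp_of_mem ?_
    intro k1 k2 h1 h2 hlt x hx y hy
    rw [List.eq_of_mem_replicate hy, List.eq_of_mem_replicate hx]
    have v1 : (Char.ofNat k1).toNat = k1 := by
      rw [Char.toNat_ofNat]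
      simp only [List.mem_range] at h1
      simp [Nat.isValidChar]; omega
    have v2 : (Char.ofNat k2).toNat = k2 := by
      rw [Char.toNat_ofNat]
      simp only [List.mem_range] at h2
      simp [Nat.isValidChar]; omega
    rw [v1, v2]; omega

theorem pv_sorted_eq (X Y : String) (hX : pvDomStr X = true) :
    PySem.List.sorted (pvAnswer X Y) (fun c => c.toNat) true = pvCanon X Y := by
  have hchar : ∀ a b : Char, b.toNat ≤ a.toNat → b ≤ a := by
    intro a b h
    simpa [Char.le_def, UInt32.le_iff_toNat_le] using h
  have hperm' : (PySem.List.sorted (pvAnswer X Y) (fun c : Char => c.toNat) true).Perm (pvCanon X Y) :=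
    (PySem.List.sorted_perm (pvAnswer X Y) (fun c : Char => c.toNat) true).trans (pv_perm X Y hX)
  have h4 : (PySem.List.sorted (pvAnswer X Y) (fun c : Char => c.toNat) true).Pairwise
      (fun a b => b.toNat ≤ a.toNat) := PySem.List.sorted_pairwise_rev _ _
  exact List.Perm.eq_of_pairwise
    (fun a b _ _ h1 h2 => le_antisymm h2 h1)
    (h4.imp (fun h => hchar _ _ h))
    ((pv_canon_pairwise X Y).imp (fun h => hchar _ _ h))
    hperm'

theorem pv_cnt_count (X : String) (k : Nat) (hk : k < 128) :
    (X.toList.foldl (fun a ch => a.set ch.toNat (a.getD ch.toNat 0 + 1))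
      (List.replicate 128 (0 : Int))).getD k 0 = (X.toList.count (Char.ofNat k) : Int) := by
  rw [pv_cnt_arr _ _ _ (by simpa using hk), pv_countP_eq_count _ _ (by omega)]
  have h0 : (List.replicate 128 (0 : Int)).getD k 0 = 0 := by
    rw [List.getD_eq_getElem?_getD, List.getElem?_replicate]
    simp [hk]
  rw [h0]; ring

theorem pv_alt_eq (X Y : String) :
    solution_alt X Y =
      (if (pvCanon X Y).length = 0 then "-1"
       else if ((pvMult X Y '0' : Nat) : Int) = ((pvCanon X Y).length : Int) then "0"
       else String.ofList (pvCanon X Y)) := by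
  have hrange : PySem.List.pyRange 126 (-1) (-1) = List.map (fun k : Nat => (k : Int)) ((List.range 127).reverse) := by
    decide
  have hparts :
      ((PySem.List.pyRange 126 (-1) (-1)).map (fun code =>
        let a := PySem.List.pyGetD (X.toList.foldl (fun a ch => a.set ch.toNat (a.getD ch.toNat 0 + 1)) (List.replicate 128 (0:Int))) code 0
        let b := PySem.List.pyGetD (Y.toList.foldl (fun a ch => a.set ch.toNat (a.getD ch.toNat 0 + 1)) (List.replicate 128 (0:Int))) code 0
        let m := if a < b then a else b
        List.replicate m.toNat (Char.ofNat code.toNat)))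
      = ((List.range 127).reverse).map (fun k => List.replicate (pvMult X Y (Char.ofNat k)) (Char.ofNat k)) := by
    rw [hrange, List.map_map]
    apply List.map_congr_left
    intro k hk
    have hk127 : k < 127 := by simpa using hk
    simp only [Function.comp]
    rw [PySem.List.pyGetD_natCast, PySem.List.pyGetD_natCast,
      pv_cnt_count X k (by omega), pv_cnt_count Y k (by omega)]
    have hmin : (if (X.toList.count (Char.ofNat k) : Int) < (Y.toList.count (Char.ofNat k) : Int)
        then (X.toList.count (Char.ofNat k) : Int) else (Y.toList.count (Char.ofNat k) : Int))
        = (pvMult X Y (Char.ofNat k) : Int) := by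
      unfold pvMult
      split_ifs with hlt <;> rw [Nat.cast_lt] at * <;> push_cast <;> omega
    rw [hmin, Int.toNat_natCast, Int.toNat_natCast]
  show (if (PySem.Chars.join [] _).length = 0 then "-1" else _) = _
  rw [hparts, pv_join_nil, ← List.flatMap_def]
  have h48a := pv_cnt_count X 48 (by omega)
  have h48b := pv_cnt_count Y 48 (by omega)
  rw [PySem.List.pyGetD_ofNat', PySem.List.pyGetD_ofNat', h48a, h48b]
  have hmin0 : (if (X.toList.count (Char.ofNat 48) : Int) < (Y.toList.count (Char.ofNat 48) : Int)
      then (X.toList.count (Char.ofNat 48) : Int) else (Y.toList.count (Char.ofNat 48) : Int))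
      = ((pvMult X Y '0' : Nat) : Int) := by
    have : Char.ofNat 48 = '0' := by decide
    rw [this]
    unfold pvMult
    split_ifs with hlt <;> rw [Nat.cast_lt] at * <;> push_cast <;> omega
  rw [hmin0]
  rfl

-- ===== VERDICT (by name: the statement is the Claim_ definition above) =====
theorem solution_spec : Claim_equal_solution := by
  intro X Y hdom
  have hX : pvDomStr X = true := by
    simp only [Dom_solution, Bool.and_eq_true] at hdom; exact hdom.1
  unfold Spec_solution
  rw [pv_solution_eq, pv_alt_eq]
  have hperm := pv_perm X Y hX
  have hlen := hperm.length_eq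
  have hc0 : PySem.List.count (pvAnswer X Y) '0' = pvMult X Y '0' := by
    rw [PySem.List.count_eq]; exact pv_count_answer X Y '0'
  rw [hc0, hlen, pv_sorted_eq X Y hX]
  simp only [Nat.cast_inj]
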